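-- pv_equiv track=rewrite | github.com/nermadie/CodeForces_Solutions | CodeforcesRound909Div3/prob02.py | max_absolute_difference
-- ===== SOURCE A (Python) =====
-- def get_all_divisors(n):
--     divisors = []
--     i = 1
--     while i * i <= n:
--         if n % i == 0:
--             divisors.append(i)
--             divisors.append(n // i)
--         i += 1
--     return divisors
--
-- def max_absolute_difference(n, weights):
--     sum_all_prev_weights = [0] * n
--     sum_all_prev_weights[0] = weights[0]
--     for i in range(1, n):
--         sum_all_prev_weights[i] = sum_all_prev_weights[i - 1] + weights[i]
--     divisors = get_all_divisors(n)
--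
--     max_difference = 0
--
--     for divisor in divisors:
--         max_sum = 0
--         min_sum = 100000000000000000
--         for i in range(divisor - 1, n, divisor):
--             sum_prev_weights = sum_all_prev_weights[i]
--             if i - divisor >= 0:
--                 sum_prev_weights -= sum_all_prev_weights[i - divisor]
--             if sum_prev_weights > max_sum:
--                 max_sum = sum_prev_weights
--             if sum_prev_weights < min_sum:
--                 min_sum = sum_prev_weights
--         if max_sum - min_sum > max_difference:
--             max_difference = max_sum - min_sum
--     return max_difference
-- ===== SOURCE B (Python) =====
-- def max_absolute_difference(n, weights):
--     max_difference = 0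
--     for d in range(1, n + 1):
--         if n % d != 0:
--             continue
--         max_sum = 0
--         min_sum = 100000000000000000
--         for start in range(0, n, d):
--             s = 0
--             for i in range(start, start + d):
--                 s += weights[i]
--             if s > max_sum:
--                 max_sum = s
--             if s < min_sum:
--                 min_sum = s
--         if max_sum - min_sum > max_difference:
--             max_difference = max_sum - min_sum
--     return max_difference
-- ===== Notes on version B (the rewrite author's own statement) =====
-- stated objective: simpler
-- what changed: Drops the prefix-sum array and the sqrt-paired divisor helper: divisors are taken by a single linear filter over 1..n and each length-d block is summed directly by an inner loop over its elements, keeping A's sentinel initialisations.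
import Mathlib
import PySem

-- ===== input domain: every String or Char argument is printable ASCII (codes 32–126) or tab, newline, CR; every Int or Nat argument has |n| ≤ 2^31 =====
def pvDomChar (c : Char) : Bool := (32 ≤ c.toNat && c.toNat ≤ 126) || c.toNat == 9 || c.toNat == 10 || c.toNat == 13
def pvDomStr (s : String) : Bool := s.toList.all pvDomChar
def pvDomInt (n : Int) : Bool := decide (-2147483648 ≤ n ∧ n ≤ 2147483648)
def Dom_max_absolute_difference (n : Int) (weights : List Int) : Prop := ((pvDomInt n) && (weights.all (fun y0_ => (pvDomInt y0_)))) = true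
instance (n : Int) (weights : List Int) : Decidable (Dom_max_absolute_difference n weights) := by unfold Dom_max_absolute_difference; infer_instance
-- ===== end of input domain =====

-- B drops A's prefix-sum array and sqrt-paired divisor helper: it filters divisors linearly and
-- sums each block directly by an inner loop (objective: simpler; same sentinels, same return value).

-- ===== PORT A =====
-- while i * i <= n: if n % i == 0: append i; append n // i; i += 1
def getAllDivisorsLoop (n : Int) (i : Int) (acc : List Int) : List Int :=
  if h : i * i ≤ n then
    getAllDivisorsLoop n (i + 1)
      (if PySem.Int.mod n i = 0 then acc ++ [i, PySem.Int.floordiv n i] else acc)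
  else acc
termination_by (n + 1 - i).toNat
decreasing_by
  have hn : i ≤ n := by
    rcases le_or_gt i 0 with h0 | h0
    · exact le_trans h0 (le_trans (mul_self_nonneg i) h)
    · calc i = i * 1 := by ring
        _ ≤ i * i := by nlinarith
        _ ≤ n := h
  omega

def get_all_divisors (n : Int) : List Int := getAllDivisorsLoop n 1 []

-- sum_all_prev_weights: [0]*n, [0] = weights[0], then the range(1, n) accumulation loop
def pyPrefix (n : Int) (weights : List Int) : List Int :=
  (PySem.List.pyRange 1 n 1).foldl
    (fun p i => PySem.List.pySetD p i
      (PySem.List.pyGetD p (i - 1) 0 + PySem.List.pyGetD weights i 0))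
    (PySem.List.pySetD (PySem.List.pyRepeat [(0 : Int)] n) 0 (PySem.List.pyGetD weights 0 0))

-- the inner 'for i in range(divisor - 1, n, divisor)' loop of A, tracking (max_sum, min_sum)
def innerPassA (pre : List Int) (n d : Int) : Int × Int :=
  (PySem.List.pyRange (d - 1) n d).foldl
    (fun s i =>
      let v0 := PySem.List.pyGetD pre i 0
      let v := if 0 ≤ i - d then v0 - PySem.List.pyGetD pre (i - d) 0 else v0
      (if v > s.1 then v else s.1, if v < s.2 then v else s.2))
    (0, 100000000000000000)

def max_absolute_difference (n : Int) (weights : List Int) : Int :=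
  let pre := pyPrefix n weights
  (get_all_divisors n).foldl
    (fun md d =>
      let r := innerPassA pre n d
      if r.1 - r.2 > md then r.1 - r.2 else md) 0

-- ===== PORT B =====
-- the inner 'for start in range(0, n, d)' loop of B: each block summed by 'for i in range(start, start + d)'
def blockPassB (weights : List Int) (n d : Int) : Int × Int :=
  (PySem.List.pyRange 0 n d).foldl
    (fun s start =>
      let v := (PySem.List.pyRange start (start + d) 1).foldl
        (fun acc i => acc + PySem.List.pyGetD weights i 0) 0
      (if v > s.1 then v else s.1, if v < s.2 then v else s.2))
    (0, 100000000000000000)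

def max_absolute_difference_alt (n : Int) (weights : List Int) : Int :=
  (PySem.List.pyRange 1 (n + 1) 1).foldl
    (fun md d =>
      if PySem.Int.mod n d ≠ 0 then md
      else
        let r := blockPassB weights n d
        if r.1 - r.2 > md then r.1 - r.2 else md) 0

-- ===== PRECONDITION & SPEC =====
-- Pre_ excludes exactly the inputs where A raises IndexError: n < 1 ([0]*n is empty, so
-- sum_all_prev_weights[0] = weights[0] fails) or len(weights) < n (weights[i] out of range).
-- (B raises on the same inputs except n < 1, where its empty divisor loop returns 0.)
def Pre_max_absolute_difference (n : Int) (weights : List Int) : Prop :=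
  1 ≤ n ∧ n ≤ (weights.length : Int)
instance (n : Int) (weights : List Int) : Decidable (Pre_max_absolute_difference n weights) := by
  unfold Pre_max_absolute_difference; infer_instance

def pvWitness_max_absolute_difference : Int × List Int := (2, [1, 3])

def Spec_max_absolute_difference (n : Int) (weights : List Int) (out : Int) : Prop :=
  out = max_absolute_difference_alt n weights
instance (n : Int) (weights : List Int) (out : Int) : Decidable (Spec_max_absolute_difference n weights out) := by
  unfold Spec_max_absolute_difference; infer_instance

-- ===== CLAIM (what is proved, stated in full; the proofs are below) =====
def Claim_equal_max_absolute_difference : Prop :=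
  ∀ (n : Int) (weights : List Int), Dom_max_absolute_difference n weights →
    Pre_max_absolute_difference n weights →
    Spec_max_absolute_difference n weights (max_absolute_difference n weights)

-- ===== LEMMAS AND PROOFS =====

-- `if v > a then v else a` is `max a v`
lemma ite_gt_eq_max (a v : Int) : (if v > a then v else a) = max a v := by
  rw [max_def]; split_ifs <;> omega

-- foldl max lands on the seed or a member
lemma foldl_max_mem (l : List Int) : ∀ a : Int, l.foldl max a = a ∨ l.foldl max a ∈ l := by
  induction l with
  | nil => intro a; left; rfl
  | cons x xs ih =>
    intro a
    rw [List.foldl_cons]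
    rcases ih (max a x) with h | h
    · rcases max_choice a x with hm | hm <;> rw [hm] at h ⊢ <;> simp [h]
    · right; exact List.mem_cons_of_mem _ h

-- foldl max only depends on the member set
lemma foldl_max_eq (l₁ l₂ : List Int) (a : Int) (h : ∀ x, x ∈ l₁ ↔ x ∈ l₂) :
    l₁.foldl max a = l₂.foldl max a := by
  apply le_antisymm
  · rcases foldl_max_mem l₁ a with h1 | h1
    · rw [h1]; exact (PySem.List.le_foldl_max l₂ a).1
    · exact (PySem.List.le_foldl_max l₂ a).2 _ ((h _).mp h1)
  · rcases foldl_max_mem l₂ a with h1 | h1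
    · rw [h1]; exact (PySem.List.le_foldl_max l₁ a).1
    · exact (PySem.List.le_foldl_max l₁ a).2 _ ((h _).mpr h1)

lemma mem_divLoop (n : Int) : ∀ (i : Int) (acc : List Int) (x : Int), 1 ≤ i →
    (x ∈ getAllDivisorsLoop n i acc ↔
      x ∈ acc ∨ ∃ j : Int, i ≤ j ∧ j * j ≤ n ∧ j ∣ n ∧ (x = j ∨ x = n / j)) := by
  intro i acc x
  induction i, acc using getAllDivisorsLoop.induct n with
  | case1 i acc h ih =>
    intro hi
    rw [getAllDivisorsLoop, dif_pos h]
    simp only [dite_eq_ite] at ih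
    rw [ih (by omega)]
    have hi0 : (0 : Int) < i := by omega
    have hfd : PySem.Int.floordiv n i = n / i := PySem.Int.floordiv_eq_ediv_of_pos hi0
    by_cases hmod : PySem.Int.mod n i = 0
    · have hdvd : i ∣ n := (PySem.Int.mod_eq_zero_iff_dvd n i).mp hmod
      rw [if_pos hmod]
      constructor
      · rintro (hx | ⟨j, hj1, hj2, hj3, hj4⟩)
        · rcases List.mem_append.mp hx with hx | hx
          · exact Or.inl hx
          · right
            refine ⟨i, le_refl i, h, hdvd, ?_⟩
            simp only [List.mem_cons, List.not_mem_nil, or_false] at hx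
            rcases hx with hx | hx
            · exact Or.inl hx
            · rw [hfd] at hx; exact Or.inr hx
        · exact Or.inr ⟨j, by omega, hj2, hj3, hj4⟩
      · rintro (hx | ⟨j, hj1, hj2, hj3, hj4⟩)
        · exact Or.inl (List.mem_append.mpr (Or.inl hx))
        · rcases eq_or_lt_of_le hj1 with rfl | hlt
          · left
            apply List.mem_append.mpr; right
            rcases hj4 with rfl | rfl
            · simp
            · rw [hfd]; simp
          · exact Or.inr ⟨j, by omega, hj2, hj3, hj4⟩
    · rw [if_neg hmod]
      constructor
      · rintro (hx | ⟨j, hj1, hj2, hj3, hj4⟩)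
        · exact Or.inl hx
        · exact Or.inr ⟨j, by omega, hj2, hj3, hj4⟩
      · rintro (hx | ⟨j, hj1, hj2, hj3, hj4⟩)
        · exact Or.inl hx
        · refine Or.inr ⟨j, ?_, hj2, hj3, hj4⟩
          rcases eq_or_lt_of_le hj1 with rfl | hlt
          · exact absurd ((PySem.Int.mod_eq_zero_iff_dvd n i).mpr hj3) hmod
          · omega
  | case2 i acc h =>
    intro hi
    rw [getAllDivisorsLoop, dif_neg h]
    constructor
    · exact Or.inl
    · rintro (hx | ⟨j, hj1, hj2, hj3, hj4⟩)
      · exact hx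
      · have hij : i * i ≤ j * j := by nlinarith
        exact absurd (le_trans hij hj2) h

lemma mem_divisors_iff (n : Int) (hn : 1 ≤ n) (x : Int) :
    x ∈ get_all_divisors n ↔ 1 ≤ x ∧ x ∣ n := by
  rw [get_all_divisors, mem_divLoop n 1 [] x (le_refl 1)]
  simp only [List.not_mem_nil, false_or]
  constructor
  · rintro ⟨j, hj1, hj2, hj3, rfl | rfl⟩
    · exact ⟨hj1, hj3⟩
    · have hj0 : (0 : Int) < j := by omega
      have hle : j ≤ n / j := (Int.le_ediv_iff_mul_le hj0).mpr hj2
      exact ⟨by omega, ⟨j, (Int.ediv_mul_cancel hj3).symm⟩⟩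
  · rintro ⟨hx1, hx2⟩
    by_cases hxx : x * x ≤ n
    · exact ⟨x, hx1, hxx, hx2, Or.inl rfl⟩
    · have hx0 : (0 : Int) < x := by omega
      have hxn : x ≤ n := Int.le_of_dvd (by omega) hx2
      have hy1 : 1 ≤ n / x := (Int.le_ediv_iff_mul_le hx0).mpr (by omega)
      have hyx : n / x * x = n := Int.ediv_mul_cancel hx2
      have hylt : n / x < x := by nlinarith
      refine ⟨n / x, hy1, by nlinarith, ⟨x, hyx.symm⟩, Or.inr ?_⟩
      set y := n / x with hy
      rw [← hyx, Int.mul_ediv_cancel_left x (by omega)]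

-- proof-only helper: the prefix fold cut off after the first m-1 iterations
def preFold (w : List Int) (N : Nat) (m : Nat) : List Int :=
  (PySem.List.pyRange 1 (m : Int) 1).foldl
    (fun p i => PySem.List.pySetD p i
      (PySem.List.pyGetD p (i - 1) 0 + PySem.List.pyGetD w i 0))
    (PySem.List.pySetD (PySem.List.pyRepeat [(0 : Int)] (N : Int)) 0 (PySem.List.pyGetD w 0 0))

lemma preFold_base (w : List Int) (N : Nat) (h1 : 1 ≤ N) (hlen : N ≤ w.length) :
    (PySem.List.pySetD (PySem.List.pyRepeat [(0 : Int)] (N : Int)) 0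
        (PySem.List.pyGetD w 0 0)).length = N ∧
    PySem.List.pyGetD
      (PySem.List.pySetD (PySem.List.pyRepeat [(0 : Int)] (N : Int)) 0
        (PySem.List.pyGetD w 0 0)) 0 0 = (w.take 1).sum := by
  have h0 : 0 < w.length := by omega
  have hrep : PySem.List.pyRepeat [(0 : Int)] (N : Int) = List.replicate N 0 := by
    rw [PySem.List.pyRepeat_singleton]; norm_num
  constructor
  · rw [PySem.List.length_pySetD, hrep, List.length_replicate]
  · have := PySem.List.pyGetD_pySetD_natCast (List.replicate N (0 : Int)) 0 0
      (PySem.List.pyGetD w 0 0) 0 (by simpa using h1)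
    simp only [Nat.cast_zero] at this
    rw [hrep, this]
    rw [if_true]
    have hg : PySem.List.pyGetD w ((0 : Nat) : Int) 0 = w.getD 0 0 :=
      PySem.List.pyGetD_natCast w 0 0
    simp only [Nat.cast_zero] at hg
    rw [hg, List.getD_eq_getElem w 0 h0]
    have := List.sum_take_succ w 0 h0
    simpa using this.symm

lemma preFold_spec (w : List Int) (N : Nat) (h1 : 1 ≤ N) (hlen : N ≤ w.length) :
    ∀ m : Nat, m ≤ N →
      (preFold w N m).length = N ∧
      ∀ j : Nat, j < m →
        PySem.List.pyGetD (preFold w N m) (j : Int) 0 = (w.take (j + 1)).sum := by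
  intro m
  induction m with
  | zero =>
    intro _
    unfold preFold
    rw [PySem.List.pyRange_one_eq_nil (by omega)]
    simp only [List.foldl_nil]
    exact ⟨(preFold_base w N h1 hlen).1, fun j hj => absurd hj (by omega)⟩
  | succ m ih =>
    intro hmN
    by_cases hm : m = 0
    · subst hm
      unfold preFold
      rw [PySem.List.pyRange_one_eq_nil (by simp)]
      simp only [List.foldl_nil]
      refine ⟨(preFold_base w N h1 hlen).1, fun j hj => ?_⟩
      have hj0 : j = 0 := by omega
      subst hj0
      simpa using (preFold_base w N h1 hlen).2
    · have hm1 : 1 ≤ m := by omega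
      obtain ⟨ihlen, ihget⟩ := ih (by omega)
      have hstep : preFold w N (m + 1) =
          PySem.List.pySetD (preFold w N m) (m : Int)
            (PySem.List.pyGetD (preFold w N m) ((m : Int) - 1) 0 +
              PySem.List.pyGetD w (m : Int) 0) := by
        unfold preFold
        have hc : ((m + 1 : Nat) : Int) = (m : Int) + 1 := by push_cast; ring
        rw [hc, PySem.List.pyRange_one_succ_right (by omega)]
        simp only [List.foldl_append, List.foldl_cons, List.foldl_nil]
      have hmlt : m < (preFold w N m).length := by omega
      have hmw : m < w.length := by omega
      -- the value written at index m is the m+1-th prefix sum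
      have hval : PySem.List.pyGetD (preFold w N m) ((m : Int) - 1) 0 +
          PySem.List.pyGetD w (m : Int) 0 = (w.take (m + 1)).sum := by
        have hc1 : ((m : Int) - 1) = ((m - 1 : Nat) : Int) := by omega
        rw [hc1, ihget (m - 1) (by omega), PySem.List.pyGetD_natCast w m 0,
          List.getD_eq_getElem w 0 hmw]
        have hmm : m - 1 + 1 = m := by omega
        rw [hmm, List.sum_take_succ w m hmw]
      constructor
      · rw [hstep, PySem.List.length_pySetD]; exact ihlen
      · intro j hj
        rw [hstep]
        have := PySem.List.pyGetD_pySetD_natCast (preFold w N m) m j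
          (PySem.List.pyGetD (preFold w N m) ((m : Int) - 1) 0 +
            PySem.List.pyGetD w (m : Int) 0) 0 hmlt
        rw [this]
        by_cases hjm : j = m
        · rw [if_pos hjm, hval, hjm]
        · rw [if_neg hjm]
          exact ihget j (by omega)

lemma pyPrefix_spec (w : List Int) (N : Nat) (h1 : 1 ≤ N) (hlen : N ≤ w.length) :
    ∀ j : Nat, j < N →
      PySem.List.pyGetD (pyPrefix (N : Int) w) (j : Int) 0 = (w.take (j + 1)).sum := by
  intro j hj
  have hpp : pyPrefix (N : Int) w = preFold w N N := rfl
  rw [hpp]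
  exact (preFold_spec w N h1 hlen N (le_refl N)).2 j hj

-- B's inner index loop sums the block weights[a:a+b]
lemma foldl_getD_sum (w : List Int) (a : Nat) :
    ∀ (b : Nat) (c : Int), a + b ≤ w.length →
      (PySem.List.pyRange (a : Int) ((a : Int) + (b : Int)) 1).foldl
        (fun s i => s + PySem.List.pyGetD w i 0) c = c + ((w.drop a).take b).sum := by
  intro b
  induction b with
  | zero =>
    intro c _
    rw [Nat.cast_zero, add_zero, PySem.List.pyRange_one_eq_nil (le_refl _)]
    simp
  | succ b ih =>
    intro c h
    have hcast : ((b + 1 : Nat) : Int) = (b : Int) + 1 := by push_cast; ring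
    rw [hcast, ← add_assoc, PySem.List.pyRange_one_succ_right (by omega), List.foldl_append]
    simp only [List.foldl_cons, List.foldl_nil]
    rw [ih c (by omega)]
    have hab : a + b < w.length := by omega
    have hgd : PySem.List.pyGetD w ((a : Int) + (b : Int)) 0 = w[a + b] := by
      have hc2 : ((a : Int) + (b : Int)) = ((a + b : Nat) : Int) := by push_cast; ring
      rw [hc2, PySem.List.pyGetD_natCast, List.getD_eq_getElem w 0 hab]
    rw [hgd]
    have hblen : b < (w.drop a).length := by rw [List.length_drop]; omega
    rw [List.sum_take_succ (w.drop a) b hblen, List.getElem_drop]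
    ring

lemma inner_eq (w : List Int) (N q d : Nat) (hd : 1 ≤ d) (hq : 1 ≤ q) (hN : N = q * d)
    (hlen : N ≤ w.length) :
    innerPassA (pyPrefix (N : Int) w) (N : Int) (d : Int) = blockPassB w (N : Int) (d : Int) := by
  have hd0 : (0 : Int) < (d : Int) := by omega
  have hN1 : 1 ≤ N := by
    have := Nat.mul_le_mul hq hd
    omega
  have hNq : (N : Int) = (q : Int) * (d : Int) := by rw [hN]; push_cast; ring
  have hdN : d ≤ N := by
    rw [hN]
    exact Nat.le_mul_of_pos_left d hq
  have hpre : ∀ j : Nat, j < N →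
      PySem.List.pyGetD (pyPrefix (N : Int) w) (j : Int) 0 = (w.take (j + 1)).sum :=
    pyPrefix_spec w N hN1 hlen
  have hsplit : ∀ a b : Nat, ((w.drop a).take b).sum = (w.take (a + b)).sum - (w.take a).sum := by
    intro a b
    rw [List.take_add, List.sum_append]
    ring
  unfold innerPassA blockPassB
  rw [PySem.List.pyRange_of_pos ((d : Int) - 1) (N : Int) hd0,
    PySem.List.pyRange_of_pos 0 (N : Int) hd0]
  rw [if_pos (show ((d : Int) - 1) < (N : Int) by omega),
    if_pos (show (0 : Int) < (N : Int) by omega)]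
  have hcA : ((((N : Int) - ((d : Int) - 1) + (d : Int) - 1) / (d : Int))).toNat = q := by
    have e1 : ((N : Int) - ((d : Int) - 1) + (d : Int) - 1) = (N : Int) := by ring
    rw [e1, hNq, Int.mul_ediv_cancel _ (by omega)]
    simp
  have hcB : ((((N : Int) - 0 + (d : Int) - 1) / (d : Int))).toNat = q := by
    have e2 : ((N : Int) - 0 + (d : Int) - 1) = ((d : Int) - 1) + (q : Int) * (d : Int) := by
      rw [hNq]; ring
    rw [e2, Int.add_mul_ediv_right _ _ (show (d : Int) ≠ 0 by omega),
      Int.ediv_eq_zero_of_lt (by omega) (by omega)]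
    simp
  rw [hcA, hcB, List.foldl_map, List.foldl_map]
  apply PySem.List.foldl_congr_mem
  intro acc k hk
  have hkq : k < q := List.mem_range.mp hk
  have hdk1 : d * (k + 1) ≤ d * q := Nat.mul_le_mul_left d hkq
  have hdk2 : d * k + d ≤ d * q := by rw [← Nat.mul_succ]; exact hdk1
  have hNdq : N = d * q := by rw [hN, Nat.mul_comm]
  have hjlt : d - 1 + d * k < N := by omega
  have cast1 : ((d : Int) - 1 + (d : Int) * (k : Int)) = ((d - 1 + d * k : Nat) : Int) := by
    push_cast [Nat.cast_sub hd]
    ring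
  -- A's block value
  have hvA : (if 0 ≤ ((d : Int) - 1 + (d : Int) * (k : Int)) - (d : Int) then
        PySem.List.pyGetD (pyPrefix (N : Int) w) ((d : Int) - 1 + (d : Int) * (k : Int)) 0 -
          PySem.List.pyGetD (pyPrefix (N : Int) w) (((d : Int) - 1 + (d : Int) * (k : Int)) - (d : Int)) 0
      else PySem.List.pyGetD (pyPrefix (N : Int) w) ((d : Int) - 1 + (d : Int) * (k : Int)) 0) =
      (w.take (d * k + d)).sum - (w.take (d * k)).sum := by
    have hv0 : PySem.List.pyGetD (pyPrefix (N : Int) w) ((d : Int) - 1 + (d : Int) * (k : Int)) 0 =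
        (w.take (d * k + d)).sum := by
      rw [cast1, hpre (d - 1 + d * k) hjlt]
      have e : d - 1 + d * k + 1 = d * k + d := by omega
      rw [e]
    rcases Nat.eq_zero_or_pos k with hk0 | hk1
    · subst hk0
      rw [if_neg (by push_cast; omega)]
      rw [hv0]
      simp
    · have hdk0 : 1 ≤ d * k := Nat.one_le_iff_ne_zero.mpr (by positivity)
      have cast2 : (((d : Int) - 1 + (d : Int) * (k : Int)) - (d : Int)) = ((d * k - 1 : Nat) : Int) := by
        push_cast [Nat.cast_sub hdk0]
        ring
      have hNlt : d * k - 1 < N := by omega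
      rw [if_pos (by rw [cast2]; exact Int.natCast_nonneg _), hv0, cast2,
        hpre (d * k - 1) hNlt]
      have e2 : d * k - 1 + 1 = d * k := by omega
      rw [e2]
  -- B's block value
  have castB : ((0 : Int) + (d : Int) * (k : Int)) = ((d * k : Nat) : Int) := by push_cast; ring
  have hvB : (PySem.List.pyRange ((0 : Int) + (d : Int) * (k : Int))
        (((0 : Int) + (d : Int) * (k : Int)) + (d : Int)) 1).foldl
        (fun acc i => acc + PySem.List.pyGetD w i 0) 0 =
      (w.take (d * k + d)).sum - (w.take (d * k)).sum := by
    rw [castB, foldl_getD_sum w (d * k) d 0 (by omega), hsplit]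
    ring
  simp only [hvA, hvB]

lemma main_eq (w : List Int) (N : Nat) (h1 : 1 ≤ N) (hlen : N ≤ w.length) :
    max_absolute_difference (N : Int) w = max_absolute_difference_alt (N : Int) w := by
  have hN0 : (0 : Int) < (N : Int) := by omega
  -- A as a fold of max over the mapped divisor list
  have hA : max_absolute_difference (N : Int) w =
      ((get_all_divisors (N : Int)).map
        (fun d => (innerPassA (pyPrefix (N : Int) w) (N : Int) d).1 -
          (innerPassA (pyPrefix (N : Int) w) (N : Int) d).2)).foldl max 0 := by
    unfold max_absolute_difference
    rw [List.foldl_map]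
    apply PySem.List.foldl_congr_mem
    intro acc d _
    simp only [ite_gt_eq_max]
  -- B as a fold of max over the mapped filtered range
  have hB : max_absolute_difference_alt (N : Int) w =
      (((PySem.List.pyRange 1 ((N : Int) + 1) 1).filter
          (fun x => decide (PySem.Int.mod (N : Int) x = 0))).map
        (fun d => (blockPassB w (N : Int) d).1 - (blockPassB w (N : Int) d).2)).foldl max 0 := by
    unfold max_absolute_difference_alt
    rw [List.foldl_map, List.foldl_filter]
    apply PySem.List.foldl_congr_mem
    intro acc d _
    by_cases hmod : PySem.Int.mod (N : Int) d = 0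
    · simp only [hmod, ite_gt_eq_max]
      simp
    · simp [hmod]
  -- on divisors, A's prefix-sum pass agrees with B's slice pass
  have hmap : (get_all_divisors (N : Int)).map
      (fun d => (innerPassA (pyPrefix (N : Int) w) (N : Int) d).1 -
        (innerPassA (pyPrefix (N : Int) w) (N : Int) d).2) =
      (get_all_divisors (N : Int)).map
      (fun d => (blockPassB w (N : Int) d).1 - (blockPassB w (N : Int) d).2) := by
    apply List.map_congr_left
    intro d hdmem
    obtain ⟨hd1, hddvd⟩ := (mem_divisors_iff (N : Int) (by omega) d).mp hdmem
    have hdD : d = ((d.toNat : Nat) : Int) := by omega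
    have hDdvd : d.toNat ∣ N := by
      rw [← Int.natCast_dvd_natCast, ← hdD]
      exact hddvd
    have hD1 : 1 ≤ d.toNat := by omega
    have hq1 : 1 ≤ N / d.toNat := by
      rw [Nat.one_le_div_iff (by omega)]
      exact Nat.le_of_dvd (by omega) hDdvd
    have hNsplit : N = (N / d.toNat) * d.toNat := (Nat.div_mul_cancel hDdvd).symm
    have := inner_eq w N (N / d.toNat) d.toNat hD1 hq1 hNsplit hlen
    rw [hdD, this]
  -- both divisor lists enumerate the same set
  have hiff : ∀ d : Int, d ∈ get_all_divisors (N : Int) ↔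
      d ∈ (PySem.List.pyRange 1 ((N : Int) + 1) 1).filter
        (fun x => decide (PySem.Int.mod (N : Int) x = 0)) := by
    intro d
    rw [mem_divisors_iff (N : Int) (by omega) d, List.mem_filter,
      PySem.List.mem_pyRange_one]
    simp only [decide_eq_true_eq, PySem.Int.mod_eq_zero_iff_dvd]
    constructor
    · rintro ⟨hd1, hdvd⟩
      exact ⟨⟨hd1, by have := Int.le_of_dvd hN0 hdvd; omega⟩, hdvd⟩
    · rintro ⟨⟨hd1, _⟩, hdvd⟩
      exact ⟨hd1, hdvd⟩
  rw [hA, hmap, hB]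
  apply foldl_max_eq
  intro x
  simp only [List.mem_map]
  constructor
  · rintro ⟨d, hd, rfl⟩
    exact ⟨d, (hiff d).mp hd, rfl⟩
  · rintro ⟨d, hd, rfl⟩
    exact ⟨d, (hiff d).mpr hd, rfl⟩

-- ===== VERDICT (by name: the statement is the Claim_ definition above) =====
theorem max_absolute_difference_spec : Claim_equal_max_absolute_difference := by
  intro n w _hdom hpre
  obtain ⟨h1, h2⟩ := hpre
  unfold Spec_max_absolute_difference
  have hn : n = ((n.toNat : Nat) : Int) := by omega
  rw [hn]
  exact main_eq w n.toNat (by omega) (by omega)
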